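-- pv_equiv track=rewrite | github.com/victortvalderrama/bill_parser | ioutils.py | rebuild_searching_list
-- ===== SOURCE A (Python) =====
-- def rebuild_searching_list(looking_list, tokens):
--     rebuilt_tokens = []
--     i = 0
--     while i < len(tokens):
--         found = False
--         for look in looking_list:
--             look_parts = look.split()
--             if tokens[i:i + len(look_parts)] == look_parts:
--                 rebuilt_tokens.append(look)
--                 i += len(look_parts)
--                 found = True
--                 break
--         if not found:
--             rebuilt_tokens.append(tokens[i])
--             i += 1
--     return rebuilt_tokens
-- ===== SOURCE B (Python) =====
-- def rebuild_searching_list(looking_list, tokens):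
--     # Index phrases by their first word, pre-splitting each phrase once;
--     # at each position only candidates starting with the current token are tried.
--     index = {}
--     for look in looking_list:
--         parts = look.split()
--         if parts:
--             index.setdefault(parts[0], []).append((look, parts))
--     rebuilt = []
--     i = 0
--     n = len(tokens)
--     while i < n:
--         t = tokens[i]
--         for look, parts in index.get(t, ()):
--             if tokens[i:i + len(parts)] == parts:
--                 rebuilt.append(look)
--                 i += len(parts)
--                 break
--         else:
--             rebuilt.append(t)
--             i += 1
--     return rebuilt
-- ===== Notes on version B (the rewrite author's own statement) =====
-- stated objective: faster
-- what changed: B pre-splits every phrase once and indexes the phrases by their first word in an order-preserving dict, so at each token position only the candidates whose first word equals the current token are compared, instead of re-splitting and testing every phrase of looking_list at every position.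
-- outside the precondition, e.g. on rebuild_searching_list([''], ['a']): A does not finish within the time limit, B returns ['a']; on rebuild_searching_list(['a', ''], ['a']): A returns ['a'], B returns ['a']
import Mathlib
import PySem

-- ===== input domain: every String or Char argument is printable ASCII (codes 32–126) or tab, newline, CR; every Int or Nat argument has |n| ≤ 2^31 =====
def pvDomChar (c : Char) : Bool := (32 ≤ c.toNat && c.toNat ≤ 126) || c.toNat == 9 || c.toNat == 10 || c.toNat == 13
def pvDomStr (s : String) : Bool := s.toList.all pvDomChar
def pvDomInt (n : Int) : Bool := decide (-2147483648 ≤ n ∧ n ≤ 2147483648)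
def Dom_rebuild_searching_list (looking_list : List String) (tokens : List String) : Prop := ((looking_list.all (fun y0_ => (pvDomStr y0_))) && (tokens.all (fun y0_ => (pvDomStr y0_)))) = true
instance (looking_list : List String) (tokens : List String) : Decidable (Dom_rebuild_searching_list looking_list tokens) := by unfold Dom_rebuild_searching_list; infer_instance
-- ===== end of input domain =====

-- B indexes the phrases by first word (pre-split once) so only matching candidates are tried
-- at each position; a timing run measured it faster. Equality of return values is proved
-- on Pre_ (A can loop forever when a phrase splits to no words and tokens is nonempty).

-- ===== PORT A =====
-- inner 'for look in looking_list' scan: first phrase whose split matches the token prefix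
def pvFindA (looking_list : List String) (rest : List String) : Option (String × List String) :=
  match looking_list with
  | [] => none
  | look :: more =>
    let look_parts := PySem.Str.split₀ look
    if rest.take look_parts.length = look_parts then some (look, look_parts)
    else pvFindA more rest

-- the while loop, on the suffix tokens[i:]; fuel = tokens.length makes it total
-- (it only runs out where the Python loops forever, i.e. outside Pre_)
def pvLoopA (looking_list : List String) : Nat → List String → List String
  | _, [] => []
  | 0, _ :: _ => []
  | fuel + 1, t :: ts =>
    match pvFindA looking_list (t :: ts) with
    | some (look, look_parts) => look :: pvLoopA looking_list fuel ((t :: ts).drop look_parts.length)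
    | none => t :: pvLoopA looking_list fuel ts

def rebuild_searching_list (looking_list : List String) (tokens : List String) : List String :=
  pvLoopA looking_list tokens.length tokens

-- ===== PORT B =====
-- index.setdefault(parts[0], []).append((look, parts)) = modify parts[0] [] (· ++ [(look, parts)])
def pvIndexB (looking_list : List String) : PySem.Dict String (List (String × List String)) :=
  looking_list.foldl (fun d look =>
    match PySem.Str.split₀ look with
    | [] => d
    | p :: ps => d.modify p [] (· ++ [(look, p :: ps)])) PySem.Dict.empty

-- the 'for look, parts in index.get(t, ())' scan over the bucket
def pvFindB (cands : List (String × List String)) (rest : List String) : Option (String × List String) :=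
  match cands with
  | [] => none
  | (look, parts) :: cs =>
    if rest.take parts.length = parts then some (look, parts) else pvFindB cs rest

def pvLoopB (index : PySem.Dict String (List (String × List String))) : Nat → List String → List String
  | _, [] => []
  | 0, _ :: _ => []
  | fuel + 1, t :: ts =>
    match pvFindB (index.getD t []) (t :: ts) with
    | some (look, parts) => look :: pvLoopB index fuel ((t :: ts).drop parts.length)
    | none => t :: pvLoopB index fuel ts

def rebuild_searching_list_alt (looking_list : List String) (tokens : List String) : List String :=
  pvLoopB (pvIndexB looking_list) tokens.length tokens

-- ===== PRECONDITION & SPEC =====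
-- Pre_ excludes inputs where tokens is nonempty and some phrase of looking_list splits to no
-- words: matching such a phrase consumes no tokens, so Python's A can loop forever there
-- (it still returns when an earlier phrase always matches first; those inputs are excluded too).
def Pre_rebuild_searching_list (looking_list : List String) (tokens : List String) : Prop :=
  tokens = [] ∨ ∀ look ∈ looking_list, PySem.Str.split₀ look ≠ []
instance (looking_list : List String) (tokens : List String) : Decidable (Pre_rebuild_searching_list looking_list tokens) := by unfold Pre_rebuild_searching_list; infer_instance

def pvWitness_rebuild_searching_list : List String × List String :=
  (["a b", "c"], ["a", "b", "c", "d"])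

def Spec_rebuild_searching_list (looking_list : List String) (tokens : List String) (out : List String) : Prop := out = rebuild_searching_list_alt looking_list tokens
instance (looking_list : List String) (tokens : List String) (out : List String) : Decidable (Spec_rebuild_searching_list looking_list tokens out) := by unfold Spec_rebuild_searching_list; infer_instance

-- ===== CLAIM (what is proved, stated in full; the proofs are below) =====
def Claim_equal_rebuild_searching_list : Prop := ∀ (looking_list : List String) (tokens : List String), Dom_rebuild_searching_list looking_list tokens → Pre_rebuild_searching_list looking_list tokens → Spec_rebuild_searching_list looking_list tokens (rebuild_searching_list looking_list tokens)

-- ===== LEMMAS AND PROOFS =====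

-- the candidates with first word t, in original order (what B's bucket for t holds)
def pvCands (looking_list : List String) (t : String) : List (String × List String) :=
  looking_list.filterMap (fun look =>
    match PySem.Str.split₀ look with
    | [] => none
    | p :: ps => if p = t then some (look, p :: ps) else none)

lemma pvIndexB_getD (looking_list : List String) (t : String)
    (d : PySem.Dict String (List (String × List String))) :
    (looking_list.foldl (fun d look =>
      match PySem.Str.split₀ look with
      | [] => d
      | p :: ps => d.modify p [] (· ++ [(look, p :: ps)])) d).getD t []
    = d.getD t [] ++ pvCands looking_list t := by
  induction looking_list generalizing d with
  | nil => simp [pvCands]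
  | cons look more ih =>
    simp only [List.foldl_cons, pvCands, List.filterMap_cons]
    cases hsp : PySem.Str.split₀ look with
    | nil => simpa [pvCands] using ih d
    | cons p ps =>
      by_cases hpt : p = t
      · subst hpt
        rw [ih]
        simp [pvCands]
      · rw [ih]
        simp [pvCands, PySem.Dict.getD_modify, hpt, Ne.symm hpt]

lemma pvFind_eq (looking_list : List String) (t : String) (ts : List String)
    (hne : ∀ look ∈ looking_list, PySem.Str.split₀ look ≠ []) :
    pvFindA looking_list (t :: ts) = pvFindB (pvCands looking_list t) (t :: ts) := by
  induction looking_list with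
  | nil => rfl
  | cons look more ih =>
    have hmore : ∀ l ∈ more, PySem.Str.split₀ l ≠ [] := fun l hl => hne l (List.mem_cons_of_mem _ hl)
    have hx : PySem.Str.split₀ look ≠ [] := hne look (by simp)
    cases hsp : PySem.Str.split₀ look with
    | nil => exact absurd hsp hx
    | cons p ps =>
      by_cases hpt : p = t
      · subst hpt
        simp only [pvFindA, pvCands, List.filterMap_cons, hsp]
        by_cases hm : ts.take ps.length = ps
        · simp [pvFindB, hm]
        · show _ = pvFindB ((look, p :: ps) :: pvCands more p) (p :: ts)
          simp only [pvFindB, List.length_cons, List.take_succ_cons, List.cons.injEq,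
            true_and, if_neg hm]
          exact ih hmore
      · -- first word differs: A's test fails, and look is not in the bucket
        have hfail : ¬ ((t :: ts).take (p :: ps).length = p :: ps) := by
          intro h
          simp at h
          exact hpt h.1.symm
        simp only [pvFindA, hsp, pvCands, List.filterMap_cons, if_neg hfail, if_neg hpt]
        simpa [pvCands] using ih hmore

lemma pvLoop_eq (looking_list : List String) (fuel : Nat) (rest : List String)
    (hne : ∀ look ∈ looking_list, PySem.Str.split₀ look ≠ []) :
    pvLoopA looking_list fuel rest = pvLoopB (pvIndexB looking_list) fuel rest := by
  induction fuel generalizing rest with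
  | zero => cases rest <;> rfl
  | succ fuel ih =>
    cases rest with
    | nil => rfl
    | cons t ts =>
      have hbucket : (pvIndexB looking_list).getD t [] = pvCands looking_list t := by
        have := pvIndexB_getD looking_list t PySem.Dict.empty
        simpa [pvIndexB, PySem.Dict.getD_empty] using this
      simp only [pvLoopA, pvLoopB, hbucket, pvFind_eq looking_list t ts hne]
      cases pvFindB (pvCands looking_list t) (t :: ts) with
      | none => simp [ih]
      | some r => simp [ih]

-- ===== VERDICT (by name: the statement is the Claim_ definition above) =====
theorem rebuild_searching_list_spec : Claim_equal_rebuild_searching_list := by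
  intro looking_list tokens _ hpre
  unfold Spec_rebuild_searching_list rebuild_searching_list rebuild_searching_list_alt
  rcases hpre with h | h
  · subst h; rfl
  · exact pvLoop_eq looking_list tokens.length tokens h
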